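-- pv_equiv track=rewrite | github.com/Jeff-Lowrey/leet_code | solutions/backtracking/051-n-queens.py | solveNQueensCount
-- ===== SOURCE A (Python) =====
-- def solveNQueensCount(n: int) -> int:
--     """
--     Count the number of distinct solutions to N-Queens (for problem 52).
--
--     Returns:
--         Number of distinct solutions
--     """
--     def solve():
--         if len(queens) == n:
--             return 1
--
--         count = 0
--         row = len(queens)
--         for col in range(n):
--             if (col in cols or
--                 (row - col) in diag1 or
--                 (row + col) in diag2):
--                 continue
--
--             queens.append(col)
--             cols.add(col)
--             diag1.add(row - col)
--             diag2.add(row + col)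
--
--             count += solve()
--
--             queens.pop()
--             cols.remove(col)
--             diag1.remove(row - col)
--             diag2.remove(row + col)
--
--         return count
--
--     queens = []
--     cols = set()
--     diag1 = set()
--     diag2 = set()
--
--     return solve()
-- ===== SOURCE B (Python) =====
-- def solveNQueensCount(n: int) -> int:
--     """Count N-Queens solutions by bitmask backtracking (three ints instead of sets)."""
--     if n < 0:
--         return 0
--     full = (1 << n) - 1
--
--     def solve(rows_left, cols, diag1, diag2):
--         if rows_left == 0:
--             return 1
--         free = ~(cols | diag1 | diag2) & full
--         count = 0
--         while free:
--             low = free & (free - 1)   # free with its lowest set bit cleared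
--             bit = free ^ low          # the lowest set bit
--             free = low
--             count += solve(rows_left - 1, cols | bit, (diag1 | bit) << 1, (diag2 | bit) >> 1)
--         return count
--
--     return solve(n, 0, 0, 0)
-- ===== Notes on version B (the rewrite author's own statement) =====
-- stated objective: alternative
-- what changed: Replaces the set-based backtracking (queens list plus three Python sets mutated and unmade around each recursive call) by bitmask backtracking: three integers cols/diag1/diag2 threaded through the recursion, with each row's free columns computed as one mask and enumerated by low-bit extraction (free & (free-1)).
import Mathlib
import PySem

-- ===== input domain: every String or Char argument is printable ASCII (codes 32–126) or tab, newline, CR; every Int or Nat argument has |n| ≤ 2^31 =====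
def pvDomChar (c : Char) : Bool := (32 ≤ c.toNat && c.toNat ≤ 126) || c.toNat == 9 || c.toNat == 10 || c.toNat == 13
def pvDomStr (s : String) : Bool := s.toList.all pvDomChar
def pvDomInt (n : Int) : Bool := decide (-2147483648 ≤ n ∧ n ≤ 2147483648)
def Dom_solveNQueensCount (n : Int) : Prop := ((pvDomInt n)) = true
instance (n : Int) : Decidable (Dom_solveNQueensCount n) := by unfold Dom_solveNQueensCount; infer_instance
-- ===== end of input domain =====

-- B replaces A's set-based backtracking by bitmask backtracking: three integers threaded through
-- the recursion instead of three sets, each row's free columns enumerated by low-bit extraction.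

-- ===== PORT A =====
-- Recursion fuel: the Python recursion deepens only while len(queens) < n, so fuel = (n - len(queens)).toNat
-- suffices. At fuel 0 with len(queens) ≠ n necessarily n < 0 and queens = []: Python's
-- 'for col in range(n)' is then empty and solve returns 0, which is the 0 below.
def pvGoA (fuel : Nat) (n : Int) (queens : List Int) (cols d1 d2 : PySem.Set Int) : Int :=
  if (queens.length : Int) = n then 1
  else
    match fuel with
    | 0 => 0
    | f + 1 =>
      (PySem.List.pyRange 0 n 1).foldl
        (fun count col =>
          if cols.contains col || d1.contains ((queens.length : Int) - col)
              || d2.contains ((queens.length : Int) + col) then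
            count
          else
            count + pvGoA f n (queens ++ [col]) (cols.add col)
              (d1.add ((queens.length : Int) - col)) (d2.add ((queens.length : Int) + col)))
        0

def solveNQueensCount (n : Int) : Int :=
  pvGoA n.toNat n [] PySem.Set.empty PySem.Set.empty PySem.Set.empty

-- ===== PORT B =====
-- Port of Source B. fuel = rows_left. 'free = ~(cols|diag1|diag2) & full' is exact for the nonnegative
-- masks Source B builds: with full = 2^n - 1, Python's ~x & full equals (x ^^^ full) &&& full.
-- 'low = free & (free-1)' and 'bit = free ^ low' are the Nat operations &&&, ^^^ verbatim.
mutual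
def pvGoB (fuel : Nat) (full cols d1 d2 : Nat) : Int :=
  match fuel with
  | 0 => 1
  | f + 1 => pvLoopB f full (((cols ||| d1 ||| d2) ^^^ full) &&& full) cols d1 d2 0
termination_by (fuel, 0)
decreasing_by
  exact Prod.Lex.left _ _ (by omega)

def pvLoopB (f full free cols d1 d2 : Nat) (acc : Int) : Int :=
  if free = 0 then acc
  else
    let low := free &&& (free - 1)
    let bit := free ^^^ low
    pvLoopB f full low cols d1 d2
      (acc + pvGoB f full (cols ||| bit) ((d1 ||| bit) <<< 1) ((d2 ||| bit) >>> 1))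
termination_by (f, free + 1)
decreasing_by
  all_goals
    have h1 : free &&& (free - 1) ≤ free - 1 := Nat.and_le_right
    exact Prod.Lex.right _ (by omega)
end

def solveNQueensCount_alt (n : Int) : Int :=
  if n < 0 then 0
  else pvGoB n.toNat ((1 <<< n.toNat) - 1) 0 0 0

-- ===== PRECONDITION & SPEC =====
def Spec_solveNQueensCount (n : Int) (out : Int) : Prop := out = solveNQueensCount_alt n
instance (n : Int) (out : Int) : Decidable (Spec_solveNQueensCount n out) := by
  unfold Spec_solveNQueensCount; infer_instance

-- ===== CLAIM (what is proved, stated in full; the proofs are below) =====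
def Claim_equal_solveNQueensCount : Prop :=
  ∀ (n : Int), Dom_solveNQueensCount n → Spec_solveNQueensCount n (solveNQueensCount n)

-- ===== LEMMAS AND PROOFS =====

-- unfolding equations for the two ports
lemma pvGoA_succ (f : Nat) (n : Int) (queens : List Int) (cols d1 d2 : PySem.Set Int)
    (hne : ¬ ((queens.length : Int) = n)) :
    pvGoA (f + 1) n queens cols d1 d2 =
      (PySem.List.pyRange 0 n 1).foldl
        (fun count col =>
          if cols.contains col || d1.contains ((queens.length : Int) - col)
              || d2.contains ((queens.length : Int) + col) then
            count
          else
            count + pvGoA f n (queens ++ [col]) (cols.add col)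
              (d1.add ((queens.length : Int) - col)) (d2.add ((queens.length : Int) + col)))
        0 := by
  rw [pvGoA, if_neg hne]

lemma pvGoB_zero (full cols d1 d2 : Nat) : pvGoB 0 full cols d1 d2 = 1 := by
  rw [pvGoB.eq_def]

lemma pvGoB_succ (f full cols d1 d2 : Nat) :
    pvGoB (f + 1) full cols d1 d2 =
      pvLoopB f full (((cols ||| d1 ||| d2) ^^^ full) &&& full) cols d1 d2 0 := by
  rw [pvGoB.eq_def]

lemma pvLoopB_zero (f full cols d1 d2 : Nat) (acc : Int) :
    pvLoopB f full 0 cols d1 d2 acc = acc := by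
  rw [pvLoopB.eq_def]
  simp

lemma pvLoopB_step (f full free cols d1 d2 : Nat) (acc : Int) (h0 : ¬ free = 0) :
    pvLoopB f full free cols d1 d2 acc =
      pvLoopB f full (free &&& (free - 1)) cols d1 d2
        (acc + pvGoB f full (cols ||| (free ^^^ (free &&& (free - 1))))
          ((d1 ||| (free ^^^ (free &&& (free - 1)))) <<< 1)
          ((d2 ||| (free ^^^ (free &&& (free - 1)))) >>> 1)) := by
  rw [pvLoopB.eq_def, if_neg h0]

-- low-bit extraction: a nonzero free has a least set bit k, and free &&& (free-1) clears exactly it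
lemma pv_lowbit : ∀ free : Nat, free ≠ 0 →
    ∃ k, free.testBit k = true ∧ (∀ j, j < k → free.testBit j = false) ∧
      (∀ j, (free &&& (free - 1)).testBit j = (free.testBit j && !decide (j = k))) := by
  intro free
  induction free using Nat.strong_induction_on with
  | _ free ih =>
    intro h0
    rcases Nat.even_or_odd free with he | ho
    · have he2 : free % 2 = 0 := by rcases he with ⟨m, hm⟩; omega
      have ha : free / 2 ≠ 0 := by omega
      have hlt : free / 2 < free := by omega
      obtain ⟨k, hk, hbelow, hchar⟩ := ih (free / 2) hlt ha
      refine ⟨k + 1, ?_, ?_, ?_⟩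
      · simpa [Nat.testBit_add_one] using hk
      · intro j hj
        match j with
        | 0 => simp [Nat.testBit_zero]; omega
        | j' + 1 =>
          have := hbelow j' (by omega)
          simpa [Nat.testBit_add_one] using this
      · intro j
        match j with
        | 0 => simp [Nat.testBit_zero]; omega
        | j' + 1 =>
          have hd : (free - 1) / 2 = free / 2 - 1 := by omega
          have hc := hchar j'
          rw [Nat.testBit_and] at hc
          rw [Nat.testBit_add_one, Nat.and_div_two, Nat.testBit_and, hd,
            Nat.testBit_add_one, hc]
          congr 1
          simp
    · have ho2 : free % 2 = 1 := by rcases ho with ⟨m, hm⟩; omega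
      refine ⟨0, by simp [Nat.testBit_zero, ho2], by omega, ?_⟩
      intro j
      match j with
      | 0 => simp [Nat.testBit_zero, ho2]; omega
      | j' + 1 =>
        have hd : (free - 1) / 2 = free / 2 := by omega
        rw [Nat.testBit_add_one, Nat.and_div_two, Nat.testBit_and, hd,
          Nat.testBit_add_one]
        simp

-- the cleared bit, recovered by xor, is 2^k
lemma pv_xor_low (free k : Nat) (hk : free.testBit k = true)
    (hchar : ∀ j, (free &&& (free - 1)).testBit j = (free.testBit j && !decide (j = k))) :
    free ^^^ (free &&& (free - 1)) = 2 ^ k := by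
  apply Nat.eq_of_testBit_eq
  intro j
  rw [Nat.testBit_xor, hchar j, Nat.testBit_two_pow]
  by_cases hj : j = k
  · subst hj; simp [hk]
  · cases hb : free.testBit j <;> simp [hj, Ne.symm hj]

lemma pv_pyRange_nil {a b : Int} (h : b ≤ a) : PySem.List.pyRange a b 1 = [] := by
  rw [PySem.List.pyRange_one]
  have h0 : (b - a).toNat = 0 := by omega
  simp [h0]

-- a foldl whose step skips every element of [s, s+t) can start at s+t instead
lemma pv_skip (g : Int → Int → Int) (n : Int) (att : Int → Bool)
    (hg : ∀ a x, att x = true → g a x = a) :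
    ∀ (t : Nat) (s : Int) (acc : Int), (∀ j : Int, s ≤ j → j < s + t → att j = true) →
      (PySem.List.pyRange s n 1).foldl g acc = (PySem.List.pyRange (s + t) n 1).foldl g acc := by
  intro t
  induction t with
  | zero => intro s acc _; simp
  | succ t iht =>
    intro s acc hall
    by_cases hs : s < n
    · rw [PySem.List.pyRange_one_cons hs]
      simp only [List.foldl_cons]
      rw [hg acc s (hall s le_rfl (by push_cast; omega))]
      have := iht (s + 1) acc (fun j h1 h2 => hall j (by omega) (by push_cast at h2 ⊢; omega))
      rw [this]
      congr 2
      push_cast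
      ring
    · rw [pv_pyRange_nil (by omega), pv_pyRange_nil (by push_cast; omega)]

lemma pv_contains_add (s : PySem.Set Int) (x y : Int) :
    (s.add x).contains y = (s.contains y || decide (y = x)) := by
  simp [pysem]

-- the inner while-loop of B, against the tail of A's column loop that starts at column s:
-- free holds exactly the not-yet-tried unattacked columns of [s, n)
lemma pv_loopeq (f : Nat) (n : Int) (queens : List Int) (cols d1 d2 : PySem.Set Int)
    (cm d1m d2m : Nat)
    (hn : 0 ≤ n)
    (hc : ∀ c : Nat, cm.testBit c = cols.contains (c : Int))
    (hd1 : ∀ c : Nat, d1m.testBit c = d1.contains ((queens.length : Int) - c))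
    (hb1 : ∀ x : Int, d1.contains x = true → x < (queens.length : Int))
    (hd2 : ∀ c : Nat, d2m.testBit c = d2.contains ((queens.length : Int) + c))
    (hf : (f : Int) = n - queens.length - 1)
    (ih : ∀ (queens' : List Int) (cols' d1' d2' : PySem.Set Int) (cm' d1m' d2m' : Nat),
      (f : Int) = n - queens'.length →
      (∀ c : Nat, cm'.testBit c = cols'.contains (c : Int)) →
      (∀ c : Nat, d1m'.testBit c = d1'.contains ((queens'.length : Int) - c)) →
      (∀ x : Int, d1'.contains x = true → x < (queens'.length : Int)) →
      (∀ c : Nat, d2m'.testBit c = d2'.contains ((queens'.length : Int) + c)) →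
      pvGoA f n queens' cols' d1' d2' = pvGoB f ((1 <<< n.toNat) - 1) cm' d1m' d2m') :
    ∀ (free s : Nat) (acc : Int),
      (∀ c : Nat, free.testBit c =
        (decide (s ≤ c) && decide (c < n.toNat) && !((cm ||| d1m ||| d2m).testBit c))) →
      (PySem.List.pyRange (s : Int) n 1).foldl
        (fun count col =>
          if cols.contains col || d1.contains ((queens.length : Int) - col)
              || d2.contains ((queens.length : Int) + col) then count
          else
            count + pvGoA f n (queens ++ [col]) (cols.add col)
              (d1.add ((queens.length : Int) - col)) (d2.add ((queens.length : Int) + col))) acc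
        = pvLoopB f ((1 <<< n.toNat) - 1) free cm d1m d2m acc := by
  have hN : ((n.toNat : Int)) = n := Int.toNat_of_nonneg hn
  have horbit : ∀ c : Nat, (cm ||| d1m ||| d2m).testBit c =
      (cols.contains ((c : Nat) : Int) || d1.contains ((queens.length : Int) - (c : Nat))
        || d2.contains ((queens.length : Int) + (c : Nat))) := by
    intro c
    rw [Nat.testBit_or, Nat.testBit_or, hc c, hd1 c, hd2 c]
  have hgskip : ∀ (a : Int) (x : Int),
      (cols.contains x || d1.contains ((queens.length : Int) - x)
        || d2.contains ((queens.length : Int) + x)) = true →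
      (fun count col =>
        if cols.contains col || d1.contains ((queens.length : Int) - col)
            || d2.contains ((queens.length : Int) + col) then count
        else
          count + pvGoA f n (queens ++ [col]) (cols.add col)
            (d1.add ((queens.length : Int) - col)) (d2.add ((queens.length : Int) + col))) a x
        = a := by
    intro a x hx
    simp only [hx, if_true]
  intro free
  induction free using Nat.strong_induction_on with
  | _ free ihfree =>
    intro s acc hchar
    by_cases h0 : free = 0
    · subst h0
      rw [pvLoopB_zero]
      by_cases hsN : s ≤ n.toNat
      · rw [pv_skip _ n _ hgskip (n.toNat - s) (s : Int) acc ?_]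
        · have he : (s : Int) + ((n.toNat - s : Nat) : Int) = n := by omega
          rw [he, pv_pyRange_nil le_rfl, List.foldl_nil]
        · intro j h1 h2
          have hj0 : 0 ≤ j := le_trans (by positivity) h1
          have hjc : ((j.toNat : Nat) : Int) = j := Int.toNat_of_nonneg hj0
          have hch := hchar j.toNat
          rw [Nat.zero_testBit] at hch
          have hs' : decide (s ≤ j.toNat) = true := by simp; omega
          have hn' : decide (j.toNat < n.toNat) = true := by
            simp only [decide_eq_true_eq]
            push_cast at h2
            omega
          rw [hs', hn'] at hch
          simp only [Bool.true_and] at hch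
          have horb : (cm ||| d1m ||| d2m).testBit j.toNat = true := by
            cases hb : (cm ||| d1m ||| d2m).testBit j.toNat
            · rw [hb] at hch; simp at hch
            · rfl
          rw [horbit j.toNat, hjc] at horb
          exact horb
      · rw [pv_pyRange_nil (by omega), List.foldl_nil]
    · obtain ⟨k, hk, hbelow, hlowchar⟩ := pv_lowbit free h0
      have hbit2 := pv_xor_low free k hk hlowchar
      have hkp := hchar k
      rw [hk] at hkp
      have hkp' := hkp.symm
      rw [Bool.and_eq_true, Bool.and_eq_true] at hkp'
      obtain ⟨⟨hsk', hkN'⟩, horbk'⟩ := hkp'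
      have hsk : s ≤ k := by simpa using hsk'
      have hkN : k < n.toNat := by simpa using hkN'
      have horbk : (cm ||| d1m ||| d2m).testBit k = false := by
        cases hb : (cm ||| d1m ||| d2m).testBit k
        · rfl
        · rw [hb] at horbk'; simp at horbk'
      -- A side: skip the attacked columns of [s, k)
      rw [pv_skip _ n _ hgskip (k - s) (s : Int) acc ?_]
      · have he : (s : Int) + ((k - s : Nat) : Int) = ((k : Nat) : Int) := by omega
        rw [he]
        have hkn : ((k : Nat) : Int) < n := by omega
        rw [PySem.List.pyRange_one_cons hkn]
        simp only [List.foldl_cons]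
        have hattk : (cols.contains ((k : Nat) : Int)
            || d1.contains ((queens.length : Int) - ((k : Nat) : Int))
            || d2.contains ((queens.length : Int) + ((k : Nat) : Int))) = false := by
          rw [← horbit k]; exact horbk
        rw [if_neg (by rw [hattk]; exact Bool.false_ne_true)]
        -- place the queen at column k: rewrite the recursive call by the fuel induction hypothesis
        have hlen2 : (((queens ++ [((k : Nat) : Int)]).length : Nat) : Int)
            = (queens.length : Int) + 1 := by
          simp
        rw [ih (queens ++ [((k : Nat) : Int)]) (cols.add ((k : Nat) : Int))
            (d1.add ((queens.length : Int) - ((k : Nat) : Int)))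
            (d2.add ((queens.length : Int) + ((k : Nat) : Int)))
            (cm ||| 2 ^ k) ((d1m ||| 2 ^ k) <<< 1) ((d2m ||| 2 ^ k) >>> 1)
            (by rw [hlen2]; omega)
            ?_ ?_ ?_ ?_]
        · -- the rest of the columns, via the loop induction hypothesis at low = free &&& (free-1)
          have hlow : free &&& (free - 1) ≤ free - 1 := Nat.and_le_right
          have hlowlt : free &&& (free - 1) < free := by omega
          have hcast : ((k : Nat) : Int) + 1 = (((k + 1 : Nat) : Nat) : Int) := by push_cast; ring
          rw [hcast, ihfree (free &&& (free - 1)) hlowlt (k + 1)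
              (acc + pvGoB f ((1 <<< n.toNat) - 1) (cm ||| 2 ^ k)
                ((d1m ||| 2 ^ k) <<< 1) ((d2m ||| 2 ^ k) >>> 1)) ?_]
          · -- B side: one step of the while loop
            rw [pvLoopB_step _ _ _ _ _ _ _ h0, hbit2]
          · -- mask characterization for low at start column k+1
            intro c
            rcases Nat.lt_trichotomy c k with h | h | h
            · rw [hlowchar c, hbelow c h]
              have hd : decide (k + 1 ≤ c) = false := by simp; omega
              rw [hd]
              simp
            · subst h
              rw [hlowchar c]
              have hd : decide (c + 1 ≤ c) = false := by simp
              rw [hd]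
              simp
            · rw [hlowchar c, hchar c]
              have h1 : decide (s ≤ c) = true := by simp; omega
              have h2 : decide (k + 1 ≤ c) = true := by simp; omega
              have h3 : decide (c = k) = false := by simp; omega
              rw [h1, h2, h3]
              simp
        · -- columns invariant after adding column k
          intro c
          rw [Nat.testBit_or, hc c, Nat.testBit_two_pow, pv_contains_add]
          by_cases hck : c = k
          · subst hck; simp
          · have hik : decide (((c : Nat) : Int) = ((k : Nat) : Int)) = false := by
              simp; omega
            have hnk : decide (k = c) = false := by simp; omega
            rw [hik, hnk]
            try simp
        · -- diag1 invariant after adding row - k, for the next row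
          intro c
          rw [hlen2, Nat.testBit_shiftLeft, pv_contains_add]
          match c with
          | 0 =>
            have hcon : d1.contains ((queens.length : Int) + 1 - ((0 : Nat) : Int)) = false := by
              cases hx : d1.contains ((queens.length : Int) + 1 - ((0 : Nat) : Int))
              · rfl
              · have := hb1 _ hx
                omega
            have hde : decide ((queens.length : Int) + 1 - ((0 : Nat) : Int)
                = (queens.length : Int) - ((k : Nat) : Int)) = false := by
              simp
              omega
            rw [hcon, hde]
            simp
          | c' + 1 =>
            have hge : decide (c' + 1 ≥ 1) = true := by simp
            rw [hge]
            simp only [Bool.true_and, Nat.add_sub_cancel]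
            rw [Nat.testBit_or, hd1 c', Nat.testBit_two_pow]
            have he1 : (queens.length : Int) + 1 - ((c' + 1 : Nat) : Int)
                = (queens.length : Int) - ((c' : Nat) : Int) := by push_cast; ring
            rw [he1]
            by_cases hck : c' = k
            · subst hck; simp
            · have h2 : decide ((queens.length : Int) - ((c' : Nat) : Int)
                  = (queens.length : Int) - ((k : Nat) : Int)) = false := by
                simp; omega
              have h3 : decide (k = c') = false := by simp; omega
              rw [h2, h3]
            try simp
        · -- diag1 elements stay below the next row index
          intro x hx
          rw [pv_contains_add, Bool.or_eq_true] at hx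
          rw [hlen2]
          rcases hx with hx | hx
          · have := hb1 x hx
            omega
          · have hxe : x = (queens.length : Int) - ((k : Nat) : Int) := by simpa using hx
            have hk0 : (0 : Int) ≤ ((k : Nat) : Int) := by positivity
            omega
        · -- diag2 invariant after adding row + k, for the next row
          intro c
          rw [hlen2, Nat.testBit_shiftRight, Nat.testBit_or, hd2 (1 + c),
            Nat.testBit_two_pow, pv_contains_add]
          have he1 : (queens.length : Int) + ((1 + c : Nat) : Int)
              = (queens.length : Int) + 1 + ((c : Nat) : Int) := by push_cast; ring
          rw [he1]
          by_cases hck : 1 + c = k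
          · have hde : decide ((queens.length : Int) + 1 + ((c : Nat) : Int)
                = (queens.length : Int) + ((k : Nat) : Int)) = true := by
              simp; omega
            have h3 : decide (k = 1 + c) = true := by simp; omega
            rw [hde, h3]
            try simp
          · have hde : decide ((queens.length : Int) + 1 + ((c : Nat) : Int)
                = (queens.length : Int) + ((k : Nat) : Int)) = false := by
              simp; omega
            have h3 : decide (k = 1 + c) = false := by simp; omega
            rw [hde, h3]
      · -- every column of [s, k) is attacked
        intro j h1 h2
        have hj0 : 0 ≤ j := le_trans (by positivity) h1
        have hjc : ((j.toNat : Nat) : Int) = j := Int.toNat_of_nonneg hj0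
        have hjk : j.toNat < k := by push_cast at h2; omega
        have hch := hchar j.toNat
        rw [hbelow j.toNat hjk] at hch
        have hs' : decide (s ≤ j.toNat) = true := by simp; omega
        have hn' : decide (j.toNat < n.toNat) = true := by simp; omega
        rw [hs', hn'] at hch
        simp only [Bool.true_and] at hch
        have horb : (cm ||| d1m ||| d2m).testBit j.toNat = true := by
          cases hb : (cm ||| d1m ||| d2m).testBit j.toNat
          · rw [hb] at hch; simp at hch
          · rfl
        rw [horbit j.toNat, hjc] at horb
        exact horb

-- the two recursions agree whenever the masks mirror the sets
lemma pv_main : ∀ (fuel : Nat) (n : Int) (queens : List Int) (cols d1 d2 : PySem.Set Int)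
    (cm d1m d2m : Nat),
    0 ≤ n →
    (fuel : Int) = n - queens.length →
    (∀ c : Nat, cm.testBit c = cols.contains (c : Int)) →
    (∀ c : Nat, d1m.testBit c = d1.contains ((queens.length : Int) - c)) →
    (∀ x : Int, d1.contains x = true → x < (queens.length : Int)) →
    (∀ c : Nat, d2m.testBit c = d2.contains ((queens.length : Int) + c)) →
    pvGoA fuel n queens cols d1 d2 = pvGoB fuel ((1 <<< n.toNat) - 1) cm d1m d2m := by
  intro fuel
  induction fuel with
  | zero =>
    intro n queens cols d1 d2 cm d1m d2m hn hfuel hc hd1 hb1 hd2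
    have hlen : (queens.length : Int) = n := by push_cast at hfuel; omega
    rw [pvGoA, if_pos hlen, pvGoB_zero]
  | succ f ih =>
    intro n queens cols d1 d2 cm d1m d2m hn hfuel hc hd1 hb1 hd2
    have hne : ¬ ((queens.length : Int) = n) := by push_cast at hfuel; omega
    rw [pvGoA_succ f n queens cols d1 d2 hne, pvGoB_succ]
    refine pv_loopeq f n queens cols d1 d2 cm d1m d2m hn hc hd1 hb1 hd2
        (by push_cast at hfuel ⊢; omega)
        (fun queens' cols' d1' d2' cm' d1m' d2m' hf' hc' hd1' hb1' hd2' =>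
          ih n queens' cols' d1' d2' cm' d1m' d2m' hn hf' hc' hd1' hb1' hd2')
        (((cm ||| d1m ||| d2m) ^^^ ((1 <<< n.toNat) - 1)) &&& ((1 <<< n.toNat) - 1)) 0 0 ?_
    intro c
    have hfull : (1 <<< n.toNat) - 1 = 2 ^ n.toNat - 1 := by simp [Nat.shiftLeft_eq]
    rw [Nat.testBit_and, Nat.testBit_xor, hfull, Nat.testBit_two_pow_sub_one]
    have hz : decide ((0 : Nat) ≤ c) = true := by simp
    rw [hz]
    by_cases hcN : c < n.toNat
    · have hd : decide (c < n.toNat) = true := by simp [hcN]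
      rw [hd]
      cases hb : (cm ||| d1m ||| d2m).testBit c <;> simp
    · have hd : decide (c < n.toNat) = false := by simp [hcN]
      rw [hd]
      simp

-- ===== VERDICT (by name: the statement is the Claim_ definition above) =====
theorem solveNQueensCount_spec : Claim_equal_solveNQueensCount := by
  unfold Claim_equal_solveNQueensCount
  intro n _
  unfold Spec_solveNQueensCount solveNQueensCount solveNQueensCount_alt
  by_cases hn : n < 0
  · rw [if_pos hn]
    have h0 : n.toNat = 0 := by omega
    have hne : ¬ ((([] : List Int).length : Int) = n) := by simp; omega
    rw [h0, pvGoA, if_neg hne]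
  · rw [if_neg hn]
    replace hn : 0 ≤ n := by omega
    exact pv_main n.toNat n [] PySem.Set.empty PySem.Set.empty PySem.Set.empty 0 0 0 hn
      (by simp [Int.toNat_of_nonneg hn])
      (fun c => by rw [Nat.zero_testBit]; rfl)
      (fun c => by rw [Nat.zero_testBit]; rfl)
      (fun x hx => by simp [pysem] at hx)
      (fun c => by rw [Nat.zero_testBit]; rfl)
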